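-- pv_equiv track=rewrite | github.com/David-Saeteros/SMART-Review | scripts/main.py | compute_global_inclusion
-- ===== SOURCE A (Python) =====
-- def compute_global_inclusion(ratings):
--     """
--     Determine the overall inclusion decision for an article based on majority vote.
--
--     Parameters:
--         ratings (list): List of rating strings.
--
--     Returns:
--         str: "Yes" if majority Included, "No" if majority Excluded, otherwise "Unclear".
--     """
--     filtered = [r for r in ratings if r in ["Included", "Excluded"]]
--     if not filtered:
--         return "Unclear"
--     count_included = filtered.count("Included")
--     count_excluded = filtered.count("Excluded")
--     if count_included > count_excluded:
--         return "Yes"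
--     elif count_excluded > count_included:
--         return "No"
--     else:
--         return "Unclear"
-- ===== SOURCE B (Python) =====
-- def compute_global_inclusion(ratings):
--     net = 0
--     seen = False
--     for r in ratings:
--         if r == "Included":
--             net += 1
--             seen = True
--         elif r == "Excluded":
--             net -= 1
--             seen = True
--     if not seen or net == 0:
--         return "Unclear"
--     return "Yes" if net > 0 else "No"
-- ===== Notes on version B (the rewrite author's own statement) =====
-- stated objective: simpler
-- what changed: Single fused pass maintaining a signed net tally and a seen-valid flag, replacing the filtered-list build plus two separate count() scans.
import Mathlib
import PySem

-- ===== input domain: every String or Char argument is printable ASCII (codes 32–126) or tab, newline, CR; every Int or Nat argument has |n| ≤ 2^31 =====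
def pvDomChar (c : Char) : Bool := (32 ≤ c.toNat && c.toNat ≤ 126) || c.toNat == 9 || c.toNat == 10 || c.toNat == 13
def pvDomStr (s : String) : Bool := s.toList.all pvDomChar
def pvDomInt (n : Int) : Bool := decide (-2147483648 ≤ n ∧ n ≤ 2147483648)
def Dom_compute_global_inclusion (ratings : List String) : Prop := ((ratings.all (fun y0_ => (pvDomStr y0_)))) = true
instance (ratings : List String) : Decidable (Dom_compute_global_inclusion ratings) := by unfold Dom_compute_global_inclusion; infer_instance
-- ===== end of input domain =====

-- B replaces A's filtered-list build plus two count() scans by one fused pass with a signed net tally and a seen flag (objective: simpler).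

-- ===== PORT A =====
def compute_global_inclusion (ratings : List String) : String :=
  let filtered := ratings.filter (fun r => r == "Included" || r == "Excluded")
  if filtered.isEmpty then "Unclear"
  else
    let count_included := PySem.List.count filtered "Included"
    let count_excluded := PySem.List.count filtered "Excluded"
    if count_included > count_excluded then "Yes"
    else if count_excluded > count_included then "No"
    else "Unclear"

-- ===== PORT B =====
def compute_global_inclusion_alt (ratings : List String) : String :=
  let st := ratings.foldl (fun (st : Int × Bool) r =>
      if r == "Included" then (st.1 + 1, true)
      else if r == "Excluded" then (st.1 - 1, true)
      else st) (0, false)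
  if !st.2 || st.1 == 0 then "Unclear"
  else if st.1 > 0 then "Yes" else "No"

-- ===== PRECONDITION & SPEC =====
def Spec_compute_global_inclusion (ratings : List String) (out : String) : Prop := out = compute_global_inclusion_alt ratings
instance (ratings : List String) (out : String) : Decidable (Spec_compute_global_inclusion ratings out) := by unfold Spec_compute_global_inclusion; infer_instance

-- ===== CLAIM (what is proved, stated in full; the proofs are below) =====
def Claim_equal_compute_global_inclusion : Prop := ∀ (ratings : List String), Dom_compute_global_inclusion ratings → Spec_compute_global_inclusion ratings (compute_global_inclusion ratings)

-- ===== LEMMAS AND PROOFS =====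

-- The fold's state, started from (n, b), equals (n + net over ratings, b || saw-valid over ratings).
lemma fold_state (ratings : List String) (n : Int) (b : Bool) :
    ratings.foldl (fun (st : Int × Bool) r =>
      if r == "Included" then (st.1 + 1, true)
      else if r == "Excluded" then (st.1 - 1, true)
      else st) (n, b)
    = (n + (ratings.count "Included" : Int) - (ratings.count "Excluded" : Int),
       b || ratings.any (fun r => r == "Included" || r == "Excluded")) := by
  induction ratings generalizing n b with
  | nil => simp
  | cons hd tl ih =>
    simp only [List.foldl_cons]
    by_cases h1 : hd = "Included"
    · subst h1
      rw [show (("Included" == "Included") = true) from rfl]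
      simp only [if_true, ih, List.count_cons, List.any_cons]
      simp [Prod.ext_iff]
      omega
    · by_cases h2 : hd = "Excluded"
      · subst h2
        rw [show (("Excluded" == "Included") = false) from rfl,
            show (("Excluded" == "Excluded") = true) from rfl]
        simp only [Bool.false_eq_true, if_false, if_true, ih, List.count_cons, List.any_cons]
        simp [Prod.ext_iff]
        omega
      · have e1 : (hd == "Included") = false := by simp [h1]
        have e2 : (hd == "Excluded") = false := by simp [h2]
        rw [e1, e2]
        simp only [Bool.false_eq_true, if_false, ih, List.count_cons, List.any_cons, e1, e2]
        simp

lemma count_filter_incl (ratings : List String) :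
    PySem.List.count (ratings.filter (fun r => r == "Included" || r == "Excluded")) "Included"
      = ratings.count "Included" := by
  simp [PySem.List.count, List.count_filter]

lemma count_filter_excl (ratings : List String) :
    PySem.List.count (ratings.filter (fun r => r == "Included" || r == "Excluded")) "Excluded"
      = ratings.count "Excluded" := by
  simp [PySem.List.count, List.count_filter]

lemma isEmpty_filter_iff (ratings : List String) :
    (ratings.filter (fun r => r == "Included" || r == "Excluded")).isEmpty
      = !(ratings.any (fun r => r == "Included" || r == "Excluded")) := by
  induction ratings with
  | nil => rfl
  | cons hd tl ih =>
    by_cases h : (hd == "Included" || hd == "Excluded") = true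
    · simp [h]
    · simp only [Bool.not_eq_true] at h
      simp [h, ih]

-- ===== VERDICT (by name: the statement is the Claim_ definition above) =====
theorem compute_global_inclusion_spec : Claim_equal_compute_global_inclusion := by
  intro ratings _
  unfold Spec_compute_global_inclusion compute_global_inclusion compute_global_inclusion_alt
  rw [fold_state]
  simp only [count_filter_incl, count_filter_excl, isEmpty_filter_iff]
  by_cases ha : ratings.any (fun r => r == "Included" || r == "Excluded")
  · simp only [ha, Bool.not_true, Bool.or_true]
    split_ifs with h1 h2 h3 h4 h5 <;> simp_all <;> omega
  · simp only [Bool.not_eq_true] at ha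
    simp [ha]
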